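-- pv_equiv track=rewrite | github.com/KyanDV/MBTI_KBU | mbti_new.py | jump_to_next_category
-- ===== SOURCE A (Python) =====
-- categories = {
--     "E/I": (0, 10),
--     "S/N": (10, 20),
--     "T/F": (20, 30),
--     "J/P": (30, 40),
-- }
--
-- def get_category_for_question(idx):
--     for cat, (start, end) in categories.items():
--         if start <= idx < end:
--             return cat
--     return None
--
-- def jump_to_next_category(current_idx):
--     for cat, (start, end) in categories.items():
--         if current_idx < end:
--             # jika current_idx masih di bawah end kategori ini, lompat ke awal kategori berikutnya
--             if current_idx < start:
--                 return start
--             else: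
--                 # lompat ke kategori berikutnya jika ada
--                 cat_keys = list(categories.keys())
--                 current_cat_idx = cat_keys.index(get_category_for_question(current_idx))
--                 if current_cat_idx + 1 < len(cat_keys):
--                     next_cat = cat_keys[current_cat_idx + 1]
--                     return categories[next_cat][0]
--                 else:
--                     return 40  # sudah akhir pertanyaan
--     return 40
-- ===== SOURCE B (Python) =====
-- def jump_to_next_category(current_idx):
--     for boundary in [0, 10, 20, 30, 40]:
--         if current_idx < boundary:
--             return boundary
--     return 40
-- ===== Notes on version B (the rewrite author's own statement) =====
-- stated objective: simpler
-- what changed: Replaces the dict loop with its key-list rebuild, list.index lookup and nested category search by a single scan over the explicit boundary list [0,10,20,30,40], returning the first boundary strictly above current_idx (40 if none).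
import Mathlib
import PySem

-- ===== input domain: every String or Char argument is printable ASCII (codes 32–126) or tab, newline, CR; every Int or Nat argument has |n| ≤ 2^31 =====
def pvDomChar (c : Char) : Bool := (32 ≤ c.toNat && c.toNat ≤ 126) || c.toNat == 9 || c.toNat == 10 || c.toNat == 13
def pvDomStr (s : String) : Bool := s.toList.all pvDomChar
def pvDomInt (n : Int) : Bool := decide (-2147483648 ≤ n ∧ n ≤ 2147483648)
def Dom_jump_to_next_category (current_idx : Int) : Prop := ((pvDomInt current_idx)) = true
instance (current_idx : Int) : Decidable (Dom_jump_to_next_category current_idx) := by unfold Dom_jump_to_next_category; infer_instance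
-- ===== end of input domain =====

-- B replaces A's dict loop + key-list index lookup by one scan over the boundary list [0,10,20,30,40] (simpler decomposition, same values).

-- ===== PORT A =====
-- module-level dict `categories` (insertion order)
def pyCategories : List (String × (Int × Int)) :=
  [("E/I", (0, 10)), ("S/N", (10, 20)), ("T/F", (20, 30)), ("J/P", (30, 40))]

-- the `for cat,(start,end) in categories.items()` loop of get_category_for_question
def gcfLoop (items : List (String × (Int × Int))) (idx : Int) : Option String :=
  match items with
  | [] => none
  | (cat, (s, e)) :: rest => if s ≤ idx ∧ idx < e then some cat else gcfLoop rest idx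

def get_category_for_question (idx : Int) : Option String := gcfLoop pyCategories idx

-- the `for cat,(start,end) in categories.items()` loop of jump_to_next_category.
-- Python's `cat_keys.index(...)`, `cat_keys[...]` and `categories[next_cat]` would raise on a
-- missing value; those branches are unreachable here (start ≤ current_idx < end guarantees the
-- category exists), so the `none` cases below are dead defaults.
def jumpLoop (items : List (String × (Int × Int))) (current_idx : Int) : Int :=
  match items with
  | [] => 40
  | (_, (s, e)) :: rest =>
    if current_idx < e then
      if current_idx < s then s
      else
        let cat_keys := pyCategories.map Prod.fst
        match get_category_for_question current_idx with
        | none => 40  -- unreachable (Python would raise ValueError in .index)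
        | some c =>
          match PySem.List.index? cat_keys c with
          | none => 40  -- unreachable
          | some current_cat_idx =>
            if (current_cat_idx : Int) + 1 < (cat_keys.length : Int) then
              match PySem.List.pyGet? cat_keys ((current_cat_idx : Int) + 1) with
              | none => 40  -- unreachable
              | some next_cat =>
                match pyCategories.lookup next_cat with
                | none => 40  -- unreachable
                | some (ns, _) => ns
            else 40
    else jumpLoop rest current_idx

def jump_to_next_category (current_idx : Int) : Int := jumpLoop pyCategories current_idx

-- ===== PORT B =====
-- the `for boundary in [0,10,20,30,40]` loop of Source B
def boundaryLoop (bs : List Int) (current_idx : Int) : Int :=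
  match bs with
  | [] => 40
  | b :: rest => if current_idx < b then b else boundaryLoop rest current_idx

def jump_to_next_category_alt (current_idx : Int) : Int :=
  boundaryLoop [0, 10, 20, 30, 40] current_idx

-- ===== PRECONDITION & SPEC =====
def Spec_jump_to_next_category (current_idx : Int) (out : Int) : Prop := out = jump_to_next_category_alt current_idx
instance (current_idx : Int) (out : Int) : Decidable (Spec_jump_to_next_category current_idx out) := by unfold Spec_jump_to_next_category; infer_instance

-- ===== CLAIM (what is proved, stated in full; the proofs are below) =====
def Claim_equal_jump_to_next_category : Prop := ∀ (current_idx : Int), Dom_jump_to_next_category current_idx → Spec_jump_to_next_category current_idx (jump_to_next_category current_idx)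

-- ===== LEMMAS AND PROOFS =====

-- ===== VERDICT (by name: the statement is the Claim_ definition above) =====
theorem jump_to_next_category_spec : Claim_equal_jump_to_next_category := by
  intro i _
  unfold Spec_jump_to_next_category jump_to_next_category jump_to_next_category_alt
  simp only [jumpLoop, boundaryLoop, get_category_for_question, gcfLoop, pyCategories,
    PySem.List.index?, PySem.List.pyGet?]
  split_ifs <;> first | rfl | decide | omega
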